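-- pv_equiv track=rewrite | github.com/harvestingmoon/nvidia | workflow/generative_pipeline.py | validate_hotspot_residues
-- ===== SOURCE A (Python) =====
-- from typing import Optional, List, Dict, Any, Tuple, Set
--
-- def extract_residues_from_pdb(pdb_content: str) -> Dict[str, List[int]]:
--     """
--     Extract residue numbers and chains from PDB content
--
--     Args:
--         pdb_content: PDB file content as string
--
--     Returns:
--         Dict mapping chain ID to list of residue numbers
--     """
--     residues_by_chain: Dict[str, Set[int]] = {}
--
--     for line in pdb_content.split('\n'):
--         if line.startswith('ATOM'):
--             try:
--                 chain = line[21].strip() or 'A'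
--                 res_num = int(line[22:26].strip())
--
--                 if chain not in residues_by_chain:
--                     residues_by_chain[chain] = set()
--                 residues_by_chain[chain].add(res_num)
--             except (ValueError, IndexError):
--                 continue
--
--     # Convert sets to sorted lists
--     return {chain: sorted(list(nums)) for chain, nums in residues_by_chain.items()}
--
-- def validate_hotspot_residues(pdb_content: str, hotspot_res: List[str]) -> Tuple[List[str], List[str]]:
--     """
--     Validate that hotspot residues exist in the PDB file
--
--     Args:
--         pdb_content: PDB file content
--         hotspot_res: List of hotspot residues (e.g., ["A14", "A15"])
--
--     Returns:
--         Tuple of (valid_hotspots, invalid_hotspots)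
--     """
--     residues = extract_residues_from_pdb(pdb_content)
--     valid = []
--     invalid = []
--
--     for hotspot in hotspot_res:
--         # Parse hotspot format (e.g., "A14" -> chain='A', res_num=14)
--         if len(hotspot) < 2:
--             invalid.append(hotspot)
--             continue
--
--         chain = hotspot[0].upper()
--         try:
--             res_num = int(hotspot[1:])
--         except ValueError:
--             invalid.append(hotspot)
--             continue
--
--         if chain in residues and res_num in residues[chain]:
--             valid.append(hotspot)
--         else:
--             invalid.append(hotspot)
--
--     return valid, invalid
-- ===== SOURCE B (Python) =====
-- from typing import List, Optional, Tuple
--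
--
-- def _parse_hotspot(hotspot: str) -> Optional[Tuple[str, int]]:
--     """Parse 'A14' -> ('A', 14); None if malformed (len<2 or non-int tail)."""
--     if len(hotspot) < 2:
--         return None
--     try:
--         return (hotspot[0].upper(), int(hotspot[1:]))
--     except ValueError:
--         return None
--
--
-- def _line_key(line: str) -> Optional[Tuple[str, int]]:
--     """(chain, res_num) of an ATOM line; None if not ATOM or unparsable."""
--     if not line.startswith('ATOM'):
--         return None
--     try:
--         return (line[21].strip() or 'A', int(line[22:26].strip()))
--     except (ValueError, IndexError):
--         return None
--
--
-- def validate_hotspot_residues(pdb_content: str, hotspot_res: List[str]) -> Tuple[List[str], List[str]]: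
--     parsed = [_parse_hotspot(h) for h in hotspot_res]
--     targets = set(p for p in parsed if p is not None)
--     hits = set()
--     for line in pdb_content.split('\n'):
--         key = _line_key(line)
--         if key is not None and key in targets:
--             hits.add(key)
--     valid, invalid = [], []
--     for h, p in zip(hotspot_res, parsed):
--         if p is not None and p in hits:
--             valid.append(h)
--         else:
--             invalid.append(h)
--     return valid, invalid
-- ===== Notes on version B (the rewrite author's own statement) =====
-- stated objective: alternative
-- what changed: Instead of fully indexing the PDB into a chain->sorted residue list dict and then querying it per hotspot, B parses all hotspots once into (chain,res) targets, makes a single pass over the PDB lines collecting only the keys that are targets, and partitions the hotspots by membership in that hit set; the dict-of-sorted-lists and its per-hotspot lookup disappear.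
import Mathlib
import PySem

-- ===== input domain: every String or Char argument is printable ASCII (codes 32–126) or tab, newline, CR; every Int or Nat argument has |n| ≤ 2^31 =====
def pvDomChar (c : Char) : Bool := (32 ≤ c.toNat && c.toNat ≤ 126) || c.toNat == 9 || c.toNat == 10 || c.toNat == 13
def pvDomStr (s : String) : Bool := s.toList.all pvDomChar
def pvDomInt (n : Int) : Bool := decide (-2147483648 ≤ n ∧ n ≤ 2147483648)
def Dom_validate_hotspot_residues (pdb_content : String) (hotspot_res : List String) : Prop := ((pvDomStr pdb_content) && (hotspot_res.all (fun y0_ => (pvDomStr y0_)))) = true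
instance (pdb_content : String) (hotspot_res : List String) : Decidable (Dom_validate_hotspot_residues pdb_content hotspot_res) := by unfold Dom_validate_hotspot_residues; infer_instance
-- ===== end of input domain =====

-- B restructures the pass shape: parse hotspots once, one sweep over the PDB marking target hits, partition; no chain-indexed dict of sorted residue lists. Return values proved equal; neither program mutates its arguments.

-- ===== PORT A =====
-- helper of A: builds Dict chain -> sorted residue list from the ATOM lines
def extract_residues_from_pdb (pdb_content : String) : PySem.Dict String (List Int) :=
  let residues_by_chain : PySem.Dict String (PySem.Set Int) :=
    ((PySem.Str.split? pdb_content "\n").getD []).foldl (fun d line =>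
      if PySem.Str.startswith line "ATOM" then
        match PySem.Str.pyGet? line 21 with
        | none => d   -- IndexError: continue
        | some ch =>
          let chain := if PySem.Str.strip (String.mk [ch]) = "" then "A"
                       else PySem.Str.strip (String.mk [ch])
          match PySem.Int.ofStr? (PySem.Str.strip (PySem.Str.slice line (some 22) (some 26))) with
          | none => d   -- ValueError: continue
          | some res_num =>
            PySem.Dict.insert d chain
              (PySem.Set.add ((PySem.Dict.get? d chain).getD (PySem.Set.ofList [])) res_num)
      else d) PySem.Dict.empty
  -- {chain: sorted(list(nums)) for chain, nums in residues_by_chain.items()}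
  (PySem.Dict.items residues_by_chain).foldl
    (fun d p => PySem.Dict.insert d p.1 (PySem.List.sorted p.2 id)) PySem.Dict.empty

def validate_hotspot_residues (pdb_content : String) (hotspot_res : List String) : List String × List String :=
  let residues := extract_residues_from_pdb pdb_content
  hotspot_res.foldl (fun (vi : List String × List String) hotspot =>
    let cs := hotspot.toList
    if cs.length < 2 then (vi.1, vi.2 ++ [hotspot])
    else
      let chain := String.mk (PySem.Chars.upper (cs.take 1))   -- hotspot[0].upper()
      match PySem.Int.ofChars? (cs.drop 1) with                -- int(hotspot[1:])
      | none => (vi.1, vi.2 ++ [hotspot])                      -- ValueError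
      | some res_num =>
        match PySem.Dict.get? residues chain with              -- chain in residues and res_num in residues[chain]
        | some l => if l.contains res_num then (vi.1 ++ [hotspot], vi.2)
                    else (vi.1, vi.2 ++ [hotspot])
        | none => (vi.1, vi.2 ++ [hotspot])) ([], [])

-- ===== PORT B =====
-- helper of B: parse 'A14' -> ('A', 14); none if malformed
def parse_hotspot (hotspot : String) : Option (String × Int) :=
  let cs := hotspot.toList
  if cs.length < 2 then none
  else
    match PySem.Int.ofChars? (cs.drop 1) with
    | none => none
    | some n => some (String.mk (PySem.Chars.upper (cs.take 1)), n)

-- helper of B: (chain, res_num) of an ATOM line; none if not ATOM or unparsable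
def line_key (line : String) : Option (String × Int) :=
  if PySem.Str.startswith line "ATOM" then
    match PySem.Str.pyGet? line 21 with
    | none => none
    | some ch =>
      match PySem.Int.ofStr? (PySem.Str.strip (PySem.Str.slice line (some 22) (some 26))) with
      | none => none
      | some n =>
        some ((if PySem.Str.strip (String.mk [ch]) = "" then "A"
               else PySem.Str.strip (String.mk [ch])), n)   -- line[21].strip() or 'A'
  else none

def validate_hotspot_residues_alt (pdb_content : String) (hotspot_res : List String) : List String × List String :=
  let parsed := hotspot_res.map parse_hotspot
  let targets : PySem.Set (String × Int) := PySem.Set.ofList (parsed.filterMap id)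
  let hits : PySem.Set (String × Int) :=
    ((PySem.Str.split? pdb_content "\n").getD []).foldl (fun acc line =>
      match line_key line with
      | some key => if PySem.Set.contains targets key then PySem.Set.add acc key else acc
      | none => acc) PySem.Set.empty
  (hotspot_res.zip parsed).foldl (fun (vi : List String × List String) hp =>
    match hp.2 with
    | some key => if PySem.Set.contains hits key then (vi.1 ++ [hp.1], vi.2)
                  else (vi.1, vi.2 ++ [hp.1])
    | none => (vi.1, vi.2 ++ [hp.1])) ([], [])

-- ===== PRECONDITION & SPEC =====
def Spec_validate_hotspot_residues (pdb_content : String) (hotspot_res : List String) (out : List String × List String) : Prop := out = validate_hotspot_residues_alt pdb_content hotspot_res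
instance (pdb_content : String) (hotspot_res : List String) (out : List String × List String) : Decidable (Spec_validate_hotspot_residues pdb_content hotspot_res out) := by unfold Spec_validate_hotspot_residues; infer_instance

-- ===== CLAIM (what is proved, stated in full; the proofs are below) =====
def Claim_equal_validate_hotspot_residues : Prop := ∀ (pdb_content : String) (hotspot_res : List String), Dom_validate_hotspot_residues pdb_content hotspot_res → Spec_validate_hotspot_residues pdb_content hotspot_res (validate_hotspot_residues pdb_content hotspot_res)

-- ===== LEMMAS AND PROOFS =====

-- proof-side names for the loop bodies of the two ports
def stepA (d : PySem.Dict String (PySem.Set Int)) (line : String) : PySem.Dict String (PySem.Set Int) :=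
  if PySem.Str.startswith line "ATOM" then
    match PySem.Str.pyGet? line 21 with
    | none => d
    | some ch =>
      let chain := if PySem.Str.strip (String.mk [ch]) = "" then "A"
                   else PySem.Str.strip (String.mk [ch])
      match PySem.Int.ofStr? (PySem.Str.strip (PySem.Str.slice line (some 22) (some 26))) with
      | none => d
      | some res_num =>
        PySem.Dict.insert d chain
          (PySem.Set.add ((PySem.Dict.get? d chain).getD (PySem.Set.ofList [])) res_num)
  else d

def convertA (d : PySem.Dict String (PySem.Set Int)) : PySem.Dict String (List Int) :=
  (PySem.Dict.items d).foldl (fun d p => PySem.Dict.insert d p.1 (PySem.List.sorted p.2 id)) PySem.Dict.empty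

def pdbLines (pdb_content : String) : List String := (PySem.Str.split? pdb_content "\n").getD []

def pdbKeys (pdb_content : String) : List (String × Int) := (pdbLines pdb_content).filterMap line_key

def MemA (d : PySem.Dict String (PySem.Set Int)) (k : String × Int) : Prop :=
  ∃ s, PySem.Dict.get? d k.1 = some s ∧ k.2 ∈ s

def targetsOf (hotspot_res : List String) : PySem.Set (String × Int) :=
  PySem.Set.ofList ((hotspot_res.map parse_hotspot).filterMap id)

def stepB (targets : PySem.Set (String × Int)) (acc : PySem.Set (String × Int)) (line : String) :
    PySem.Set (String × Int) :=
  match line_key line with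
  | some key => if PySem.Set.contains targets key then PySem.Set.add acc key else acc
  | none => acc

def hitsOf (pdb_content : String) (hotspot_res : List String) : PySem.Set (String × Int) :=
  (pdbLines pdb_content).foldl (stepB (targetsOf hotspot_res)) PySem.Set.empty

def goA (residues : PySem.Dict String (List Int)) (vi : List String × List String)
    (hs : List String) : List String × List String :=
  hs.foldl (fun (vi : List String × List String) hotspot =>
    let cs := hotspot.toList
    if cs.length < 2 then (vi.1, vi.2 ++ [hotspot])
    else
      let chain := String.mk (PySem.Chars.upper (cs.take 1))
      match PySem.Int.ofChars? (cs.drop 1) with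
      | none => (vi.1, vi.2 ++ [hotspot])
      | some res_num =>
        match PySem.Dict.get? residues chain with
        | some l => if l.contains res_num then (vi.1 ++ [hotspot], vi.2)
                    else (vi.1, vi.2 ++ [hotspot])
        | none => (vi.1, vi.2 ++ [hotspot])) vi

def goB (hits : PySem.Set (String × Int)) (vi : List String × List String)
    (l : List (String × Option (String × Int))) : List String × List String :=
  l.foldl (fun (vi : List String × List String) hp =>
    match hp.2 with
    | some key => if PySem.Set.contains hits key then (vi.1 ++ [hp.1], vi.2)
                  else (vi.1, vi.2 ++ [hp.1])
    | none => (vi.1, vi.2 ++ [hp.1])) vi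

lemma validate_eq (pdb_content : String) (hotspot_res : List String) :
    validate_hotspot_residues pdb_content hotspot_res =
      goA (convertA ((pdbLines pdb_content).foldl stepA PySem.Dict.empty)) ([], []) hotspot_res := rfl

lemma alt_eq (pdb_content : String) (hotspot_res : List String) :
    validate_hotspot_residues_alt pdb_content hotspot_res =
      goB (hitsOf pdb_content hotspot_res) ([], [])
        (hotspot_res.zip (hotspot_res.map parse_hotspot)) := rfl

lemma stepA_line_key (d : PySem.Dict String (PySem.Set Int)) (line : String) :
    stepA d line = match line_key line with
      | none => d
      | some k =>
        PySem.Dict.insert d k.1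
          (PySem.Set.add ((PySem.Dict.get? d k.1).getD (PySem.Set.ofList [])) k.2) := by
  unfold stepA line_key
  split
  · rcases h21 : PySem.Str.pyGet? line 21 with _ | ch <;> simp only
    rcases hn : PySem.Int.ofStr? (PySem.Str.strip (PySem.Str.slice line (some 22) (some 26))) with _ | n <;> simp only
  · rfl

lemma memA_stepA (d : PySem.Dict String (PySem.Set Int)) (line : String) (k : String × Int) :
    MemA (stepA d line) k ↔ MemA d k ∨ line_key line = some k := by
  rw [stepA_line_key]
  rcases h : line_key line with _ | ⟨c, n⟩
  · simp
  · simp only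
    constructor
    · rintro ⟨s, hs, hk⟩
      rw [PySem.Dict.get?_insert] at hs
      by_cases hc : k.1 = c
      · rw [if_pos hc] at hs
        injection hs with hs
        subst hs
        rcases (PySem.Set.mem_add _ _ _).mp hk with h1 | h1
        · rcases hg : PySem.Dict.get? d c with _ | s0
          · rw [hg] at h1
            simp only [Option.getD_none] at h1
            rw [PySem.Set.mem_ofList] at h1
            exact absurd h1 (by simp)
          · rw [hg] at h1
            simp only [Option.getD_some] at h1
            exact Or.inl ⟨s0, by rw [hc]; exact hg, h1⟩
        · right
          rcases k with ⟨k1, k2⟩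
          simp only at hc h1
          rw [hc, h1]
      · rw [if_neg hc] at hs
        exact Or.inl ⟨s, hs, hk⟩
    · rintro (⟨s, hs, hk⟩ | hek)
      · by_cases hc : k.1 = c
        · refine ⟨_, by rw [PySem.Dict.get?_insert, if_pos hc], ?_⟩
          rw [← hc, hs]
          simp only [Option.getD_some]
          exact (PySem.Set.mem_add _ _ _).mpr (Or.inl hk)
        · exact ⟨s, by rw [PySem.Dict.get?_insert, if_neg hc]; exact hs, hk⟩
      · rcases k with ⟨k1, k2⟩
        injection hek with hek
        obtain ⟨rfl, rfl⟩ := Prod.mk.injEq .. ▸ (Prod.mk.inj hek)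
        exact ⟨_, by rw [PySem.Dict.get?_insert, if_pos rfl],
          (PySem.Set.mem_add _ _ _).mpr (Or.inr rfl)⟩

lemma memA_foldl (ls : List String) (d : PySem.Dict String (PySem.Set Int)) (k : String × Int) :
    MemA (ls.foldl stepA d) k ↔ MemA d k ∨ k ∈ ls.filterMap line_key := by
  induction ls generalizing d with
  | nil => simp
  | cons l t ih =>
    simp only [List.foldl_cons, ih, memA_stepA, List.filterMap_cons]
    rcases h : line_key l with _ | k0
    · simp
    · by_cases hk : k0 = k <;> simp [hk] <;> tauto

lemma nodup_keys_foldA (ls : List String) (d : PySem.Dict String (PySem.Set Int))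
    (hd : d.keys.Nodup) : ((ls.foldl stepA d).keys).Nodup := by
  induction ls generalizing d with
  | nil => exact hd
  | cons l t ih =>
    refine ih _ ?_
    rw [stepA_line_key]
    rcases line_key l with _ | k
    · exact hd
    · exact PySem.Dict.nodup_keys_insert _ _ _ hd

lemma convertA_get (d : PySem.Dict String (PySem.Set Int)) (hd : d.keys.Nodup) (c : String) :
    PySem.Dict.get? (convertA d) c =
      (PySem.Dict.get? d c).map (fun s => PySem.List.sorted s id) := by
  unfold convertA
  simp only [PySem.Dict.get?]
  rw [PySem.Dict.items_foldl_insert_fresh (d.items) Prod.fst (fun p => PySem.List.sorted p.2 id)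
      PySem.Dict.empty (fun a _ => PySem.Dict.contains_empty a.1) hd]
  simp only [PySem.Dict.items, PySem.Dict.empty, List.nil_append]
  rw [List.find?_map]
  have hcomp : (fun (p : String × List Int) => p.1 == c) ∘
      (fun p : String × PySem.Set Int => (Prod.fst p, PySem.List.sorted p.2 id)) =
      (fun p => p.1 == c) := rfl
  rw [hcomp]
  have hval : ((fun (x : String × List Int) => x.2) ∘
      (fun p : String × PySem.Set Int => (Prod.fst p, PySem.List.sorted p.2 id))) =
      ((fun s => PySem.List.sorted s id) ∘ (fun (x : String × PySem.Set Int) => x.2)) := rfl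
  rw [Option.map_map, Option.map_map, hval]

-- the boolean A tests per hotspot, characterised by membership in the parsed PDB keys
lemma A_cond_iff (pdb_content : String) (k : String × Int) :
    (match PySem.Dict.get? (convertA ((pdbLines pdb_content).foldl stepA PySem.Dict.empty)) k.1 with
      | some l => l.contains k.2
      | none => false) = true ↔ k ∈ pdbKeys pdb_content := by
  have hnd := nodup_keys_foldA (pdbLines pdb_content) PySem.Dict.empty PySem.Dict.nodup_keys_empty
  rw [convertA_get _ hnd]
  have hmem := memA_foldl (pdbLines pdb_content) PySem.Dict.empty k
  have hempty : ¬ MemA PySem.Dict.empty k := by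
    rintro ⟨s, hs, _⟩; rw [PySem.Dict.get?_empty] at hs; simp at hs
  rcases hg : PySem.Dict.get? ((pdbLines pdb_content).foldl stepA PySem.Dict.empty) k.1 with _ | s
  · simp only [Option.map_none]
    constructor
    · intro h; exact absurd h (by simp)
    · intro h
      exact absurd (hmem.mpr (Or.inr h)) (by rintro ⟨s, hs, _⟩; rw [hg] at hs; simp at hs)
  · simp only [Option.map_some]
    rw [List.contains_iff_mem, (PySem.List.sorted_perm s id false).mem_iff]
    constructor
    · intro h
      rcases hmem.mp ⟨s, hg, h⟩ with h1 | h1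
      · exact absurd h1 hempty
      · exact h1
    · intro h
      rcases hmem.mpr (Or.inr h) with ⟨s0, hs0, hk⟩
      rw [hg] at hs0; injection hs0 with hs0; subst hs0; exact hk

lemma mem_hits_foldl (ts : PySem.Set (String × Int)) (ls : List String)
    (acc : PySem.Set (String × Int)) (k : String × Int) :
    k ∈ ls.foldl (stepB ts) acc ↔
      k ∈ acc ∨ (k ∈ ls.filterMap line_key ∧ PySem.Set.contains ts k = true) := by
  induction ls generalizing acc with
  | nil => simp
  | cons l t ih =>
    simp only [List.foldl_cons, List.filterMap_cons, stepB]
    rcases h : line_key l with _ | k0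
    · rw [ih]
    · simp only
      by_cases hts : PySem.Set.contains ts k0 = true
      · rw [if_pos hts, ih]
        simp only [PySem.Set.mem_add, List.mem_cons]
        constructor
        · rintro ((h1 | h1) | h1)
          · exact Or.inl h1
          · subst h1; exact Or.inr ⟨Or.inl rfl, hts⟩
          · exact Or.inr ⟨Or.inr h1.1, h1.2⟩
        · rintro (h1 | ⟨(h1 | h1), h2⟩)
          · exact Or.inl (Or.inl h1)
          · subst h1; exact Or.inl (Or.inr rfl)
          · exact Or.inr ⟨h1, h2⟩
      · rw [if_neg hts, ih]
        constructor
        · rintro (h1 | h1)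
          · exact Or.inl h1
          · exact Or.inr ⟨List.mem_cons_of_mem _ h1.1, h1.2⟩
        · rintro (h1 | ⟨h1, h2⟩)
          · exact Or.inl h1
          · rcases List.mem_cons.mp h1 with h1 | h1
            · exact absurd (h1 ▸ h2) hts
            · exact Or.inr ⟨h1, h2⟩

lemma hits_cond_iff (pdb_content : String) (hotspot_res : List String) (k : String × Int)
    (hk : k ∈ (hotspot_res.map parse_hotspot).filterMap id) :
    PySem.Set.contains (hitsOf pdb_content hotspot_res) k = true ↔ k ∈ pdbKeys pdb_content := by
  rw [PySem.Set.contains_iff]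
  unfold hitsOf
  rw [mem_hits_foldl]
  have hts : PySem.Set.contains (targetsOf hotspot_res) k = true := by
    rw [PySem.Set.contains_iff]
    exact (PySem.Set.mem_ofList _ _).mpr hk
  constructor
  · rintro (h | ⟨h, -⟩)
    · simp [PySem.Set.empty] at h
    · exact h
  · intro h; exact Or.inr ⟨h, hts⟩

def stepAh (residues : PySem.Dict String (List Int)) (vi : List String × List String)
    (hotspot : String) : List String × List String :=
  let cs := hotspot.toList
  if cs.length < 2 then (vi.1, vi.2 ++ [hotspot])
  else
    let chain := String.mk (PySem.Chars.upper (cs.take 1))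
    match PySem.Int.ofChars? (cs.drop 1) with
    | none => (vi.1, vi.2 ++ [hotspot])
    | some res_num =>
      match PySem.Dict.get? residues chain with
      | some l => if l.contains res_num then (vi.1 ++ [hotspot], vi.2)
                  else (vi.1, vi.2 ++ [hotspot])
      | none => (vi.1, vi.2 ++ [hotspot])

def stepBh (hits : PySem.Set (String × Int)) (vi : List String × List String)
    (hp : String × Option (String × Int)) : List String × List String :=
  match hp.2 with
  | some key => if PySem.Set.contains hits key then (vi.1 ++ [hp.1], vi.2)
                else (vi.1, vi.2 ++ [hp.1])
  | none => (vi.1, vi.2 ++ [hp.1])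

lemma goA_cons (residues : PySem.Dict String (List Int)) (vi : List String × List String)
    (h : String) (t : List String) :
    goA residues vi (h :: t) = goA residues (stepAh residues vi h) t := rfl

lemma goB_cons (hits : PySem.Set (String × Int)) (vi : List String × List String)
    (hp : String × Option (String × Int)) (l : List (String × Option (String × Int))) :
    goB hits vi (hp :: l) = goB hits (stepBh hits vi hp) l := rfl

lemma step_eq (residues : PySem.Dict String (List Int)) (hits : PySem.Set (String × Int))
    (vi : List String × List String) (h : String)
    (Hc : ∀ k, parse_hotspot h = some k →
      (match PySem.Dict.get? residues k.1 with
        | some l => l.contains k.2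
        | none => false) = PySem.Set.contains hits k) :
    stepAh residues vi h = stepBh hits vi (h, parse_hotspot h) := by
  simp only [stepAh, stepBh, parse_hotspot]
  by_cases hlen : h.toList.length < 2
  · rw [if_pos hlen, if_pos hlen]
  · rw [if_neg hlen, if_neg hlen]
    rcases hn : PySem.Int.ofChars? (h.toList.drop 1) with _ | n
    · rfl
    · have hpk : parse_hotspot h = some (String.mk (PySem.Chars.upper (h.toList.take 1)), n) := by
        simp only [parse_hotspot]
        rw [if_neg hlen, hn]
      have hcond := Hc _ hpk
      rcases hg : PySem.Dict.get? residues (String.mk (PySem.Chars.upper (h.toList.take 1))) with _ | l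
      · rw [hg] at hcond
        simp only at hcond
        show (vi.1, vi.2 ++ [h]) =
          if hits.contains (String.mk (PySem.Chars.upper (List.take 1 h.toList)), n) = true
          then (vi.1 ++ [h], vi.2) else (vi.1, vi.2 ++ [h])
        rw [← hcond, if_neg Bool.false_ne_true]
      · rw [hg] at hcond
        simp only at hcond
        show (if l.contains n = true then (vi.1 ++ [h], vi.2) else (vi.1, vi.2 ++ [h])) =
          if hits.contains (String.mk (PySem.Chars.upper (List.take 1 h.toList)), n) = true
          then (vi.1 ++ [h], vi.2) else (vi.1, vi.2 ++ [h])
        rw [hcond]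

lemma goA_eq_goB (residues : PySem.Dict String (List Int)) (hits : PySem.Set (String × Int))
    (hs : List String)
    (H : ∀ h ∈ hs, ∀ k, parse_hotspot h = some k →
      (match PySem.Dict.get? residues k.1 with
        | some l => l.contains k.2
        | none => false) = PySem.Set.contains hits k) :
    ∀ vi, goA residues vi hs = goB hits vi (hs.zip (hs.map parse_hotspot)) := by
  induction hs with
  | nil => intro vi; rfl
  | cons h t ih =>
    intro vi
    have ht : ∀ h' ∈ t, ∀ k, parse_hotspot h' = some k →
        (match PySem.Dict.get? residues k.1 with
          | some l => l.contains k.2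
          | none => false) = PySem.Set.contains hits k :=
      fun h' hm => H h' (List.mem_cons_of_mem _ hm)
    simp only [List.map_cons, List.zip_cons_cons]
    rw [goA_cons, goB_cons, step_eq residues hits vi h (H h List.mem_cons_self)]
    exact ih ht _

-- ===== VERDICT (by name: the statement is the Claim_ definition above) =====
theorem validate_hotspot_residues_spec : Claim_equal_validate_hotspot_residues := by
  intro pdb_content hotspot_res _
  unfold Spec_validate_hotspot_residues
  rw [validate_eq, alt_eq]
  apply goA_eq_goB
  intro h hm k hpk
  have hk : k ∈ (hotspot_res.map parse_hotspot).filterMap id := by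
    simp only [List.mem_filterMap, List.mem_map, id]
    exact ⟨some k, ⟨h, hm, hpk⟩, rfl⟩
  have h1 := A_cond_iff pdb_content k
  have h2 := hits_cond_iff pdb_content hotspot_res k hk
  exact Bool.eq_iff_iff.mpr (h1.trans h2.symm)
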